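-- pv_equiv track=rewrite | github.com/henryhungle/MM_DST | compute_acc.py | find_num_slots
-- ===== SOURCE A (Python) =====
-- def find_num_slots(state, sizes, colors, materials, shapes):
--     #sizes, colors, materials, shapes = 0, 0, 0, 0
--     for k,v in state.items():
--         for i,j in v.items():
--             if i == 'SIZE': sizes += 1
--             if i == 'COLOR': colors += 1
--             if i == 'MATERIAL': materials += 1
--             if i == 'SHAPE': shapes += 1
--     return sizes, colors, materials, shapes
-- ===== SOURCE B (Python) =====
-- def find_num_slots(state, sizes, colors, materials, shapes):
--     keys = [i for v in state.values() for i in v.keys()]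
--     return (sizes + keys.count('SIZE'),
--             colors + keys.count('COLOR'),
--             materials + keys.count('MATERIAL'),
--             shapes + keys.count('SHAPE'))
-- ===== Notes on version B (the rewrite author's own statement) =====
-- stated objective: simpler
-- what changed: Instead of one nested loop maintaining four conditional accumulators, B flattens all inner keys into one list and answers with four independent list.count scans added to the starting counts.
import Mathlib
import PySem

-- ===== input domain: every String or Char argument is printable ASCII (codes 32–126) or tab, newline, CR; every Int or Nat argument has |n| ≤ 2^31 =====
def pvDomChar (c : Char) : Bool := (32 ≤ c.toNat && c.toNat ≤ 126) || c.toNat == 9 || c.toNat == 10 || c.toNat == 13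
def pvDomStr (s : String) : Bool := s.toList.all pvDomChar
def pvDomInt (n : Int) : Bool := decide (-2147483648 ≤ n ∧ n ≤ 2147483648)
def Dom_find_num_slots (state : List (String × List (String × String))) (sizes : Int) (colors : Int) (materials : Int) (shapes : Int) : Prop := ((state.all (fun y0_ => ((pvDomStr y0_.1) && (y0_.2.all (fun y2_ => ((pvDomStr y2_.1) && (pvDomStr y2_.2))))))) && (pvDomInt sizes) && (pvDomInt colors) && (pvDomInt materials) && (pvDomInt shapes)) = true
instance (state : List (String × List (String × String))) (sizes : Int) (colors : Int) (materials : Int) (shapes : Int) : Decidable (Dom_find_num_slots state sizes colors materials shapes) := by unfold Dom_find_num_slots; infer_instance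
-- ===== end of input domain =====

-- B flattens all inner keys into one list and uses four independent list.count scans instead of A's nested loop with four conditional accumulators (simpler; same cost).

-- ===== PORT A =====
-- for k,v in state.items(): for i,j in v.items(): if i == 'SIZE': sizes += 1; …
def find_num_slots (state : List (String × List (String × String))) (sizes : Int) (colors : Int) (materials : Int) (shapes : Int) : Int × Int × Int × Int :=
  state.foldl (fun acc kv =>
    kv.2.foldl (fun acc ij =>
      let sizes := if ij.1 == "SIZE" then acc.1 + 1 else acc.1
      let colors := if ij.1 == "COLOR" then acc.2.1 + 1 else acc.2.1
      let materials := if ij.1 == "MATERIAL" then acc.2.2.1 + 1 else acc.2.2.1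
      let shapes := if ij.1 == "SHAPE" then acc.2.2.2 + 1 else acc.2.2.2
      (sizes, colors, materials, shapes)) acc)
    (sizes, colors, materials, shapes)

-- ===== PORT B =====
-- keys = [i for v in state.values() for i in v.keys()]; four keys.count(…) scans
def find_num_slots_alt (state : List (String × List (String × String))) (sizes : Int) (colors : Int) (materials : Int) (shapes : Int) : Int × Int × Int × Int :=
  let keys := state.flatMap (fun kv => kv.2.map Prod.fst)
  (sizes + PySem.List.count keys "SIZE",
   colors + PySem.List.count keys "COLOR",
   materials + PySem.List.count keys "MATERIAL",
   shapes + PySem.List.count keys "SHAPE")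

-- ===== PRECONDITION & SPEC =====
def Spec_find_num_slots (state : List (String × List (String × String))) (sizes : Int) (colors : Int) (materials : Int) (shapes : Int) (out : Int × Int × Int × Int) : Prop := out = find_num_slots_alt state sizes colors materials shapes
instance (state : List (String × List (String × String))) (sizes : Int) (colors : Int) (materials : Int) (shapes : Int) (out : Int × Int × Int × Int) : Decidable (Spec_find_num_slots state sizes colors materials shapes out) := by unfold Spec_find_num_slots; infer_instance

-- ===== CLAIM (what is proved, stated in full; the proofs are below) =====
def Claim_equal_find_num_slots : Prop := ∀ (state : List (String × List (String × String))) (sizes : Int) (colors : Int) (materials : Int) (shapes : Int), Dom_find_num_slots state sizes colors materials shapes → Spec_find_num_slots state sizes colors materials shapes (find_num_slots state sizes colors materials shapes)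

-- ===== LEMMAS AND PROOFS =====

lemma find_num_slots_inner (v : List (String × String)) (acc : Int × Int × Int × Int) :
    v.foldl (fun acc ij =>
      let sizes := if ij.1 == "SIZE" then acc.1 + 1 else acc.1
      let colors := if ij.1 == "COLOR" then acc.2.1 + 1 else acc.2.1
      let materials := if ij.1 == "MATERIAL" then acc.2.2.1 + 1 else acc.2.2.1
      let shapes := if ij.1 == "SHAPE" then acc.2.2.2 + 1 else acc.2.2.2
      (sizes, colors, materials, shapes)) acc
    = (acc.1 + ((v.map Prod.fst).count "SIZE" : Int),
       acc.2.1 + ((v.map Prod.fst).count "COLOR" : Int),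
       acc.2.2.1 + ((v.map Prod.fst).count "MATERIAL" : Int),
       acc.2.2.2 + ((v.map Prod.fst).count "SHAPE" : Int)) := by
  induction v generalizing acc with
  | nil => simp
  | cons ij rest ih =>
    simp only [List.foldl_cons, ih, List.map_cons, List.count_cons, Prod.mk.injEq]
    refine ⟨?_, ?_, ?_, ?_⟩ <;> (split_ifs <;> simp_all <;> ring)

lemma find_num_slots_closed (state : List (String × List (String × String)))
    (sizes colors materials shapes : Int) :
    find_num_slots state sizes colors materials shapes
      = (sizes + (((state.flatMap (fun kv => kv.2.map Prod.fst)).count "SIZE" : Nat) : Int),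
         colors + (((state.flatMap (fun kv => kv.2.map Prod.fst)).count "COLOR" : Nat) : Int),
         materials + (((state.flatMap (fun kv => kv.2.map Prod.fst)).count "MATERIAL" : Nat) : Int),
         shapes + (((state.flatMap (fun kv => kv.2.map Prod.fst)).count "SHAPE" : Nat) : Int)) := by
  induction state generalizing sizes colors materials shapes with
  | nil => simp [find_num_slots]
  | cons kv rest ih =>
    simp only [find_num_slots, List.foldl_cons] at ih ⊢
    rw [find_num_slots_inner, ih]
    simp only [List.flatMap_cons, List.count_append]
    push_cast; refine Prod.ext ?_ (Prod.ext ?_ (Prod.ext ?_ ?_)) <;> simp <;> ring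

-- ===== VERDICT (by name: the statement is the Claim_ definition above) =====
theorem find_num_slots_spec : Claim_equal_find_num_slots := by
  intro state sizes colors materials shapes _
  unfold Spec_find_num_slots find_num_slots_alt
  rw [find_num_slots_closed]
  simp [PySem.List.count_eq]
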